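-- pv_equiv track=rewrite | github.com/dramirezg-9/AI-Teacher | operation_tree.py | _list_list_sum
-- ===== SOURCE A (Python) =====
-- def _list_list_sum(lists: list) -> list:
--     if not lists:
--         return []
--     maxl = max(lists, key=lambda x: len(x))
--     mini = min(lists, key=lambda x: len(x))
--     respuesta = [_func1([x[i] for x in lists]) for i in range(len(mini))]
--     respuesta += maxl[len(mini):]
--     return respuesta
--
-- def _func1(lists: list) -> list:
--     respuesta = []
--     for x in lists:
--         if not (x is None):
--             respuesta += x
--     return respuesta
-- ===== SOURCE B (Python) =====
-- def _list_list_sum(lists: list) -> list: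
--     it = iter(lists)
--     first = next(it, None)
--     if first is None:
--         return []
--     # merged columns so far; truncated online to the running minimum length
--     cols = [list(c) if c is not None else [] for c in first]
--     maxl = first  # running first-longest list
--     for x in it:
--         if len(x) < len(cols):
--             del cols[len(x):]
--         for i, c in enumerate(x[:len(cols)]):
--             if c is not None:
--                 cols[i] += c
--         if len(maxl) < len(x):
--             maxl = x
--     return cols + maxl[len(cols):]
-- ===== Notes on version B (the rewrite author's own statement) =====
-- stated objective: alternative
-- what changed: A's staged passes (max by len, min by len, then a per-column gather through the _func1 helper over all lists) are replaced by one streaming fold over the lists whose state is the merged columns truncated online to the running minimum length plus the running first-longest list, with the None-skip inlined.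
-- outside the precondition, e.g. on _list_list_sum([[None], [None, None]]): A returns [[], None], B returns [[], None]
import Mathlib
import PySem

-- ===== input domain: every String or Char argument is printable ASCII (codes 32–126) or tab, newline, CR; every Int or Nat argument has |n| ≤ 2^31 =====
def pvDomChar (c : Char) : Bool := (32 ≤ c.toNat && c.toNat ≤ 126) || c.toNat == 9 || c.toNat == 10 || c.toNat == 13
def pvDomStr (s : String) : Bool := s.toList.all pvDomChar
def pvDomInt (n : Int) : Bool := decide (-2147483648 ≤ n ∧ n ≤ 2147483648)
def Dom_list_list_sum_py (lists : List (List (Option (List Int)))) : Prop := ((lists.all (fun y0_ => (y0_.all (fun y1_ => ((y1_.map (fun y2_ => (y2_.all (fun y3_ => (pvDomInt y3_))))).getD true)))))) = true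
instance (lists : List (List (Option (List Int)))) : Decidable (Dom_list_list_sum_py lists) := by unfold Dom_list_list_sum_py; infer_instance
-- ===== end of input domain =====

-- B replaces A's staged passes (max by len, min by len, then a per-column gather through the
-- helper _func1) by ONE streaming pass over the lists that keeps merged columns truncated to
-- the running minimum length and a running first-longest list (objective: alternative).

-- ===== PORT A =====
-- _func1: concatenate the non-None entries, in order
def pvFunc1 (ys : List (Option (List Int))) : List Int :=
  ys.foldl (fun acc x => match x with | none => acc | some l => acc ++ l) []

def list_list_sum_py (lists : List (List (Option (List Int)))) : List (List Int) :=
  if lists = [] then [] else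
  let maxl := (PySem.List.max? lists (fun x => x.length)).getD []   -- max(lists, key=len); never none here
  let mini := (PySem.List.min? lists (fun x => x.length)).getD []   -- min(lists, key=len); never none here
  let respuesta := (List.range mini.length).map (fun (i : Nat) =>
    -- x[i]: always in range since i < len(mini) ≤ len(x), so .getD none is never taken
    pvFunc1 (lists.map (fun x => (PySem.List.pyGet? x (i : Int)).getD none)))
  -- maxl[len(mini):]; under Pre_ every tail element is some, so .getD [] is exact
  respuesta ++ (PySem.List.slice maxl (some (mini.length : Int)) none).map (fun o => o.getD [])

-- ===== PORT B =====
-- one fold over the remaining lists; state = (merged columns truncated to running min, running first-longest)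
def list_list_sum_py_alt (lists : List (List (Option (List Int)))) : List (List Int) :=
  match lists with
  | [] => []
  | first :: rest =>
    let cols0 := first.map (fun c => c.getD [])          -- [c if c is not None else [] for c in first]
    let st := rest.foldl (fun (st : List (List Int) × List (Option (List Int))) x =>
      let cols := if x.length < st.1.length then st.1.take x.length else st.1   -- del cols[len(x):]
      -- for i, c in enumerate(x[:len(cols)]): if c is not None: cols[i] = cols[i] + c
      let cols := List.zipWith (fun r c => match c with | none => r | some l => r ++ l)
                    cols (x.take cols.length)
      (cols, if st.2.length < x.length then x else st.2)) (cols0, first)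
    -- cols + maxl[len(cols):]; under Pre_ every tail element is some, so .getD [] is exact
    st.1 ++ (st.2.drop st.1.length).map (fun o => o.getD [])

-- ===== PRECONDITION & SPEC =====
-- Pre_ excludes inputs where the (first) longest list contains a None beyond the shortest
-- length: there Python A returns that None inside the result, which is not a list[list[int]].
def Pre_list_list_sum_py (lists : List (List (Option (List Int)))) : Prop :=
  ∀ o ∈ ((PySem.List.max? lists (fun x => x.length)).getD []).drop
          (((PySem.List.min? lists (fun x => x.length)).getD []).length), o ≠ none
instance (lists : List (List (Option (List Int)))) : Decidable (Pre_list_list_sum_py lists) := by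
  unfold Pre_list_list_sum_py; infer_instance

def pvWitness_list_list_sum_py : List (List (Option (List Int))) := [[some [1], some [2]], [none]]

def Spec_list_list_sum_py (lists : List (List (Option (List Int)))) (out : List (List Int)) : Prop := out = list_list_sum_py_alt lists
instance (lists : List (List (Option (List Int)))) (out : List (List Int)) : Decidable (Spec_list_list_sum_py lists out) := by unfold Spec_list_list_sum_py; infer_instance

-- ===== CLAIM (what is proved, stated in full; the proofs are below) =====
def Claim_equal_list_list_sum_py : Prop := ∀ (lists : List (List (Option (List Int)))), Dom_list_list_sum_py lists → Pre_list_list_sum_py lists → Spec_list_list_sum_py lists (list_list_sum_py lists)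

-- ===== LEMMAS AND PROOFS =====

-- _func1's accumulator distributes
theorem pvFunc1_acc (ys : List (Option (List Int))) (acc : List Int) :
    ys.foldl (fun acc x => match x with | none => acc | some l => acc ++ l) acc
      = acc ++ pvFunc1 ys := by
  induction ys generalizing acc with
  | nil => simp [pvFunc1]
  | cons c t ih =>
    cases c with
    | none => simpa [pvFunc1] using ih acc
    | some l =>
      simp only [pvFunc1, List.foldl_cons, List.nil_append] at *
      rw [ih (acc ++ l), ih l, List.append_assoc]

theorem pvFunc1_cons (c : Option (List Int)) (t : List (Option (List Int))) :
    pvFunc1 (c :: t) = c.getD [] ++ pvFunc1 t := by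
  cases c with
  | none => simp only [pvFunc1, List.foldl_cons, Option.getD_none, List.nil_append]
  | some l =>
    simp only [pvFunc1, List.foldl_cons, List.nil_append, Option.getD_some]
    exact pvFunc1_acc t l

-- B's paired fold splits: the column state and the running-longest state do not interact
theorem pvFold_split (rest : List (List (Option (List Int))))
    (c0 : List (List Int)) (m0 : List (Option (List Int))) :
    rest.foldl (fun (st : List (List Int) × List (Option (List Int))) x =>
        (List.zipWith (fun r c => match c with | none => r | some l => r ++ l)
          (if x.length < st.1.length then st.1.take x.length else st.1)
          (x.take (if x.length < st.1.length then st.1.take x.length else st.1).length),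
         if st.2.length < x.length then x else st.2)) (c0, m0)
      = (rest.foldl (fun cols x =>
            List.zipWith (fun r c => match c with | none => r | some l => r ++ l)
              (if x.length < cols.length then cols.take x.length else cols)
              (x.take (if x.length < cols.length then cols.take x.length else cols).length)) c0,
         rest.foldl (fun m x => if m.length < x.length then x else m) m0) := by
  induction rest generalizing c0 m0 with
  | nil => rfl
  | cons x t ih => simp only [List.foldl_cons]; exact ih _ _

-- max? on a nonempty list is the running strict-update fold
theorem pvMax?_cons (a : List (Option (List Int))) (l : List (List (Option (List Int)))) :
    PySem.List.max? (a :: l) (fun x => x.length)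
      = some (l.foldl (fun m x => if m.length < x.length then x else m) a) := by
  simp only [PySem.List.max?, List.foldl_cons]
  induction l generalizing a with
  | nil => rfl
  | cons x t ih =>
    simp only [List.foldl_cons]
    by_cases h : a.length < x.length <;> simp [h, ih]

-- min? on a nonempty list is the running strict-update fold
theorem pvMin?_cons (a : List (Option (List Int))) (l : List (List (Option (List Int)))) :
    PySem.List.min? (a :: l) (fun x => x.length)
      = some (l.foldl (fun m x => if x.length < m.length then x else m) a) := by
  simp only [PySem.List.min?, List.foldl_cons]
  induction l generalizing a with
  | nil => rfl
  | cons x t ih =>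
    simp only [List.foldl_cons]
    by_cases h : x.length < a.length <;> simp [h, ih]

-- the length of the first-minimal element is the running min of the lengths
theorem pvMinLen (a : List (Option (List Int))) (l : List (List (Option (List Int)))) :
    (l.foldl (fun m x => if x.length < m.length then x else m) a).length
      = l.foldl (fun n x => min n x.length) a.length := by
  induction l generalizing a with
  | nil => rfl
  | cons x t ih =>
    simp only [List.foldl_cons]
    by_cases h : x.length < a.length
    · rw [if_pos h, ih x]
      have : min a.length x.length = x.length := by omega
      rw [this]
    · rw [if_neg h, ih a]
      have : min a.length x.length = a.length := by omega
      rw [this]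

-- the running minimum never exceeds its start, nor any participating length
theorem pvFoldMin_le_init (l : List (List (Option (List Int)))) (n0 : Nat) :
    l.foldl (fun n x => min n x.length) n0 ≤ n0 := by
  induction l generalizing n0 with
  | nil => simp
  | cons y t ih =>
    simp only [List.foldl_cons]
    exact le_trans (ih (min n0 y.length)) (by omega)

theorem pvFoldMin_le_mem (l : List (List (Option (List Int)))) (n0 : Nat) :
    ∀ x ∈ l, l.foldl (fun n x => min n x.length) n0 ≤ x.length := by
  induction l generalizing n0 with
  | nil => simp
  | cons y t ih =>
    intro x hx
    simp only [List.foldl_cons]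
    rcases List.mem_cons.mp hx with h | h
    · subst h
      exact le_trans (pvFoldMin_le_init t (min n0 x.length)) (by omega)
    · exact ih (min n0 y.length) x h

-- one step of B's column fold, characterised pointwise
theorem pvStep_eq (cols : List (List Int)) (x : List (Option (List Int))) :
    (List.zipWith (fun r c => match c with | none => r | some l => r ++ l)
      (if x.length < cols.length then cols.take x.length else cols)
      (x.take (if x.length < cols.length then cols.take x.length else cols).length))
    = (List.range (min cols.length x.length)).map
        (fun i => cols.getD i [] ++ ((x.getD i none).getD [])) := by
  have hiftake : (if x.length < cols.length then cols.take x.length else cols)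
      = cols.take (min cols.length x.length) := by
    split_ifs with h
    · congr 1; omega
    · rw [List.take_of_length_le (by omega)]
  rw [hiftake]
  have hlen2 : (cols.take (min cols.length x.length)).length = min cols.length x.length := by
    simp
  rw [hlen2]
  refine List.ext_getElem (by simp) ?_
  intro i h1 h2
  have hi : i < min cols.length x.length := by
    simp only [List.length_zipWith, List.length_take] at h1
    omega
  have hic : i < cols.length := by omega
  have hix : i < x.length := by omega
  rw [List.getElem_zipWith, List.getElem_map, List.getElem_range]
  rw [show ((cols.take (min cols.length x.length))[i]'(by simp; omega)) = cols[i]'hic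
      from List.getElem_take,
    show ((x.take (min cols.length x.length))[i]'(by simp; omega)) = x[i]'hix
      from List.getElem_take]
  rw [List.getD_eq_getElem?_getD, List.getElem?_eq_getElem hic,
    List.getD_eq_getElem?_getD, List.getElem?_eq_getElem hix]
  cases x[i] <;> simp

-- B's column fold in closed form: the merged columns of the accumulated input
theorem pvColsFold (P : List (List (Option (List Int)))) (cols : List (List Int)) :
    P.foldl (fun cols x =>
        List.zipWith (fun r c => match c with | none => r | some l => r ++ l)
          (if x.length < cols.length then cols.take x.length else cols)
          (x.take (if x.length < cols.length then cols.take x.length else cols).length)) cols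
      = (List.range (P.foldl (fun n x => min n x.length) cols.length)).map
          (fun i => cols.getD i [] ++ pvFunc1 (P.map (fun x => x.getD i none))) := by
  induction P generalizing cols with
  | nil =>
    simp only [List.foldl_nil, List.map_nil]
    refine List.ext_getElem (by simp) ?_
    intro i h1 h2
    simp [pvFunc1, List.getD_eq_getElem?_getD, List.getElem?_eq_getElem h1]
  | cons x t ih =>
    rw [List.foldl_cons, pvStep_eq, ih]
    simp only [List.foldl_cons, List.length_map, List.length_range]
    refine List.map_congr_left ?_
    intro i hi
    have hi' : i < t.foldl (fun n x => min n x.length) (min cols.length x.length) :=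
      List.mem_range.mp hi
    have hmin : i < min cols.length x.length :=
      lt_of_lt_of_le hi' (pvFoldMin_le_init t (min cols.length x.length))
    rw [List.getD_eq_getElem?_getD,
      List.getElem?_eq_getElem (by simpa using hmin), List.getElem_map, List.getElem_range,
      Option.getD_some, List.map_cons, pvFunc1_cons, List.append_assoc]

-- ===== VERDICT (by name: the statement is the Claim_ definition above) =====
theorem list_list_sum_py_spec : Claim_equal_list_list_sum_py := by
  intro lists _ _
  unfold Spec_list_list_sum_py list_list_sum_py list_list_sum_py_alt
  match lists with
  | [] => simp
  | first :: rest =>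
    simp only [if_neg (List.cons_ne_nil first rest)]
    rw [pvMax?_cons, pvMin?_cons, pvFold_split]
    simp only [Option.getD_some]
    rw [pvColsFold, List.length_map, pvMinLen, List.length_map, List.length_range]
    set nmin := rest.foldl (fun n x => min n x.length) first.length with hn
    have hnf : nmin ≤ first.length := pvFoldMin_le_init rest first.length
    congr 1
    · refine List.map_congr_left ?_
      intro i hi
      have hi' : i < nmin := List.mem_range.mp hi
      have hif : i < first.length := lt_of_lt_of_le hi' hnf
      rw [List.map_cons, pvFunc1_cons]
      have h0 : (first.map (fun c => c.getD [])).getD i [] = (first.getD i none).getD [] := by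
        rw [List.getD_eq_getElem?_getD, List.getD_eq_getElem?_getD,
          List.getElem?_eq_getElem (by simpa using hif), List.getElem?_eq_getElem hif]
        simp
      rw [h0]
      congr 2
      · simp [PySem.List.pyGet?_natCast, List.getD_eq_getElem?_getD,
          List.getElem?_eq_getElem hif]
      · refine List.map_congr_left ?_
        intro x hx
        have hix : i < x.length := lt_of_lt_of_le hi' (pvFoldMin_le_mem rest first.length x hx)
        simp [PySem.List.pyGet?_natCast, List.getD_eq_getElem?_getD,
          List.getElem?_eq_getElem hix]
    · rw [PySem.List.slice_from_natCast]
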